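/- GENERATED by mk_final_copies.py from the proof of the farm's unit `start_decoder.R16a` (farm:start_decoder.R16a.1: Proof.lean) as the
   re-elaboration sweep compiled it — do not edit. -/
import Asan.CheckWalk
import Vorbis.Spec.Reader
import Vorbis.Spec.Units.start_decoder_R16a

open X86 X86.User Asan Vorbis Vorbis.Spec Vorbis.Spec.StartDecoder

set_option maxRecDepth 4000
set_option maxHeartbeats 4000000

namespace Vorbis.Spec.start_decoder_R16a

/-- **Segment R16a of `start_decoder`** (`cut319` 0x11665c … 0x11667b, returns into `cut320` 0x116680): the check of `f->blocksize_1`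
(load4 at `f + 156`, inside `*f`), `setup_malloc(f, 4·blocksize_1)` with its precondition `ArenaPre`. At the return: `Frame`'s and
`Mid`'s memory parts at the call state by `FInv.carry` / `Mid.carry` (only two pushed return addresses), then ONE lemma per case of the
callee's post: `SecPt.alloc_call` (the request fits: the point for the grown ghost, `Since A.1 …`, hence `Since A9 …`) or
`SecPt.alloc_fail` (it does not: NULL, the same ghost); the loop's clauses by `ChanLoop.of_secPt` (`ChanWin.fields_same` over the
pushes and over the allocator's footprint). -/
theorem segR16a_walk {Lay : Layout} (hLay : Lay.hi = 0x1000000) {μ : Microarch} (hμ : UserX.MicroOK μ) {u₀ : State}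
    (hcode : HasCodeNat Lay u₀ Vorbis.L.start_decoder.entry Vorbis.Code.code_start_decoder.nat Vorbis.L.start_decoder.size)
    (hload4 : Asan.SmallCheck Lay μ Vorbis.WayInv (Vorbis.CodeOK u₀) [.rax, .rcx, .rdx] 4 Vorbis.L.__asan_load4_noabort.entry)
    (h_setup_malloc : ∀ (others : List Obj) (frames : List (Nat × FrameLayout)) (A : Arena),
      Calls Lay μ Vorbis.WayInv (Vorbis.conv u₀) Vorbis.L.setup_malloc.entry (Vorbis.Spec.setup_malloc.spec others frames A))
    {g : Ghost} {i : Nat} {v : State} {A9 : Arena} {A : Arena × List Obj} (hb : BodyR16 u₀ g i A9 A v) :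
    ReachVia Lay μ WayInv v (fun w => AtR16a u₀ g i w) := by
  have hl := hb.loop
  have hpt := hl.secPt
  have hfr := hpt.frame
  have hh := hpt.hand
  have hm := hpt.mid
  have hp : Pos g A := hpt.pos
  have he := hfr.entry
  v_entry he
  obtain ⟨hRa, hR8⟩ := hfr.r_eq
  simp only [steady, Ghost.RA] at hRa
  simp only [depth] at he_room he_stack
  have hflo := hp.f_lo
  have hf2 := hp.f_hi
  have hf3 := hp.f_stack
  simp only [Ghost.RA] at hf3
  have hRn : (addr g.R).toNat = g.R := toNat_addr _ (by omega)
  have hfn : (addr g.f).toNat = g.f := toNat_addr _ (by omega)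
  have w_rip := hfr.rip
  have c_rsp := hfr.rsp
  have c_rbp := hpt.rbp
  have c_r14 := hl.r14
  have w_eq : Mem.EqOn Vorbis.L.textLo Vorbis.L.textHi u₀.mem v.mem := hfr.code
  have hdf : v.flags .df = false := (show abiInv _ from hfr.inv).1
  have hmx : v.mxcsr &&& 0x1F80 = 0x1F80 := (show abiInv _ from hfr.inv).2
  have hsse := Vorbis.sseOK_of_abiInv hfr.inv
  have hsm := h_setup_malloc A.2 g.frames' A.1
  u_walk hcode [hμ.vendor] until [Vorbis.L.start_decoder.cut320] span [Vorbis.L.textLo, Vorbis.L.textHi] side (v_side)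
  case check_116666 =>
    have hun : ShadowUntouched v.mem s_116666.mem := by v_untouched
    refine (hh.obj.mono (frames'_sub g A.2)).accSmall hfr.shadow hun _ 4 (by decide) (by u_omega) ?_
    simp only [Off.sizeof.stb_vorbis]
    u_omega
  case call_inv => v_inv
  case pre_11667b =>
    have hun : ShadowUntouched v.mem s_11667b.mem := by v_untouched
    have hs : Mem.SameExcept [⟨g.R - 8, g.R⟩] v.mem s_11667b.mem := by u_same
    refine ⟨shadowPre_call hfr (by rw [w_rsp]; u_omega) hun, ?_, ?_, hh.arenaText⟩
    · rw [w_rdi, hfn]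
      exact (hh.obj.mono (frames'_sub g A.2)).blockLive
    · rw [w_rdi, hfn]
      apply hm.arena.frame (by simp only [Off.sizeof.stb_vorbis]; omega)
      apply hs.eqOn
      intro w hw
      simp only [List.mem_cons, List.mem_nil_iff, or_false] at hw
      rcases hw with rfl
      simp only [voff]
      omega
  -- the returned state (0x116680): the facts about the call state `s_11667b`
  have hsp : (s_11667b.reg .rsp).toNat + 8 = g.R := by
    rw [w_rsp_11667b]
    u_omega
  have hrdi : (s_11667b.reg .rdi).toNat = g.f := by
    rw [w_rdi_11667b]
    exact hfn
  -- the request: `4 · blocksize_1` (HD3: 64 ≤ blocksize_1 ≤ 8192, no 32-bit wrap)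
  obtain ⟨hb0, hb01, hb1⟩ := hm.header.HD3.range
  have hraw : stb_vorbis.blocksize_1 v.mem g.f = sint32 (v.mem.readLE (addr g.f + 156) 4) := by
    simp only [vacc, voff]
    rw [Mem.i32_def]
    unfold Mem.u32
    rw [← addr_add_lit]
  have hrlt := Mem.readLE_lt' v.mem (addr g.f + 156) 4
  have hcases := sint32_cases (v.mem.readLE (addr g.f + 156) 4)
  have hbs : bsize v.mem g.f 1 = v.mem.readLE (addr g.f + 156) 4 := by
    rw [bsize_one, hraw]
    omega
  have hbs_hi : v.mem.readLE (addr g.f + 156) 4 ≤ 8192 := by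
    rw [hraw] at hb1
    omega
  have hn : (s_11667b.reg .rsi).toNat % 2 ^ 32 = 4 * bsize v.mem g.f 1 := by
    rw [w_rsi_11667b, Vorbis.toNat_ofBV32, BitVec.toNat_setWidth, UInt64.toNat_toBitVec, UInt64.toNat_mul, Vorbis.toNat_ofBV32,
      BitVec.toNat_ofNat, hbs]
    have e4 : (4 : UInt64).toNat = 4 := rfl
    rw [e4]
    omega
  -- `Frame`'s and `Mid`'s memory parts at the call state: the two pushed return addresses
  have hun0 : ShadowUntouched v.mem s_11667b.mem := by v_untouched
  have hs0 : Mem.SameExcept [⟨g.R - 8, g.R⟩] v.mem s_11667b.mem := by u_same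
  have hws0 : ∀ w, w ∈ [(⟨g.R - 8, g.R⟩ : Span)] → ChanWin g i A9 A w := by
    intro w hw
    simp only [List.mem_cons, List.mem_nil_iff, or_false] at hw
    rcases hw with rfl
    unfold ChanWin
    left
    simp only []
    omega
  have hmid0 : ∀ w, w ∈ [(⟨g.R - 8, g.R⟩ : Span)] → MidWin g 9 10 A9 A w := by
    intro w hw
    simp only [List.mem_cons, List.mem_nil_iff, or_false] at hw
    rcases hw with rfl
    unfold MidWin
    left
    simp only []
    omega
  have hbits0 : Bits (g.Blk A) g.len s_11667b.mem g.f := by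
    apply bits_kept hp hm.bits hs0
    intro w hw
    simp only [List.mem_cons, List.mem_nil_iff, or_false] at hw
    rcases hw with rfl
    left
    simp only []
    omega
  have hf1 : FInv g A s_11667b.mem := (FInv.of hfr).carry hp hs0 hun0 (fun w hw => (hmid0 w hw).secWin)
  have hm1 : Mid g 9 9 10 A9 A s_11667b.mem := hm.carry hp hs0 hun0 hmid0 hbits0
  have hlt := hb.lt
  have hhd := hm.header.HD1
  have hi16 : i ≤ 16 := by omega
  -- the callee's footprint, in the callee's terms
  have hsame := w_same
  simp only [X86.User.Spec.footprint, vspec] at hsame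
  have hspn : (s_11667b.reg .rsp).toNat = g.R - 8 := by omega
  have a1 := hm.arena.AR1
  have a2 := hm.arena.AR2
  -- every window of the allocator's footprint is a `ChanWin` or lies in the shadow: the loop's fields read the same
  have hcodeOK : CodeOK u₀ s_11667br.mem := Vorbis.conv_code_eqOn w_code
  have hrbp : s_11667br.reg .rbp = addr g.f := by
    rw [w_kept.get .rbp rfl]
    exact c_rbp
  have hr14 : s_11667br.reg .r14 = v.reg .r14 := w_kept.get .r14 rfl
  have hr15 : s_11667br.reg .r15 = addr (g.f + 0x9c) := by
    rw [w_r15, addr_add_lit]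
  obtain ⟨e1, e2, e3, e4, e5, e6, e7⟩ := ChanWin.fields_same hp hi16 hs0 (fun x hx => Or.inl (hws0 x hx))
  by_cases hfit : A.1.Fits ((s_11667b.reg .rsi).toNat % 2 ^ 32)
  · -- the block was allocated: the ghost grows, `Since A.1 …`, hence `Since A9 …`
    obtain ⟨hpt', hrax, _, hsince⟩ :=
      SecPt.alloc_call hfr hh hp hf1 hm1 hsp hrdi hsame w_post hfit w_rip w_rsp hcodeOK w_inv hrbp
    have hwin := allocWins_ok hp hsp hrdi (shadow_win_of_fits hm1.arena hfit)
    obtain ⟨d1, d2, d3, d4, d5, d6, d7⟩ :=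
      ChanWin.fields_same (i := i) (A9 := A9) hp hi16 hsame (fun x hx => Or.inr (hwin x hx))
    rw [hn] at hpt' hsince
    have hloop := hl.of_secPt hpt' (A.1.extends_pushSetup _) hr14 (d1.trans e1) (d2.trans e2) (d3.trans e3) (d4.trans e4)
      (fun j hj => (d5 j hj).trans (e5 j hj)) (fun j hj => (d6 j hj).trans (e6 j hj))
      (fun j hj => (d7 j hj).trans (e7 j hj))
    have hbs' : bsize s_11667br.mem g.f 1 = bsize v.mem g.f 1 := by
      rw [bsize_one, bsize_one, d2.trans e2]
    have hraxn : (s_11667br.reg .rax).toNat = A.1.B + (A.1.S + 32) := by omega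
    refine ReachVia.done ⟨A9, _, hloop, ?_, hr15, Or.inr ?_⟩
    · rw [d1.trans e1]
      exact hlt
    · rw [hraxn, hbs']
      exact hsince.older hm.extc
  · -- the request did not fit: NULL, the same ghost
    obtain ⟨hrax, ha', hun, hfail⟩ := w_post.2 hfit
    obtain ⟨hpt', _⟩ := SecPt.alloc_fail hfr hh hp hf1 hm1 hsp hrdi ha' hun hfail w_rip w_rsp hcodeOK w_inv hrbp
    have hwin : ∀ x, x ∈ [(⟨(s_11667b.reg .rsp).toNat - 80, (s_11667b.reg .rsp).toNat⟩ : Span),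
        ⟨(s_11667b.reg .rdi).toNat + 8, (s_11667b.reg .rdi).toNat + 12⟩] → AllocWin g A x := by
      intro x hx
      simp only [List.mem_cons, List.mem_nil_iff, or_false] at hx
      unfold AllocWin
      rcases hx with rfl | rfl
      · left
        simp only []
        omega
      · right
        left
        simp only []
        omega
    obtain ⟨d1, d2, d3, d4, d5, d6, d7⟩ :=
      ChanWin.fields_same (i := i) (A9 := A9) hp hi16 hfail (fun x hx => Or.inr (hwin x hx))
    have hloop := hl.of_secPt hpt' (Arena.Extends.refl _) hr14 (d1.trans e1) (d2.trans e2) (d3.trans e3) (d4.trans e4)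
      (fun j hj => (d5 j hj).trans (e5 j hj)) (fun j hj => (d6 j hj).trans (e6 j hj))
      (fun j hj => (d7 j hj).trans (e7 j hj))
    refine ReachVia.done ⟨A9, A, hloop, ?_, hr15, Or.inl ?_⟩
    · rw [d1.trans e1]
      exact hlt
    · rw [hrax]
      rfl

end Vorbis.Spec.start_decoder_R16a

/-- The unit `start_decoder.R16a`: `segR16a_walk` at every entry state. -/
theorem Vorbis.Spec.Worked.start_decoder_R16a_ok : Vorbis.Spec.start_decoder_R16a.Statement := by
  intro Lay hLay μ hμ u₀ hcode hload4 h_setup_malloc g i v hat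
  obtain ⟨A9, A, hb⟩ := hat
  exact Vorbis.Spec.start_decoder_R16a.segR16a_walk hLay hμ hcode hload4 h_setup_malloc hb
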